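-- pv_equiv track=rewrite | github.com/linhdvu14/cp-sols | sols/Google/CodeJam/2020/2020_1A/A_Pattern_Matching.py | solve
-- ===== SOURCE A (Python) =====
-- def select(prefices):
-- 	if not prefices: return ''
-- 	prefices.sort(key=lambda x: len(x))
-- 	cand = prefices[-1]
-- 	for p in prefices:
-- 		if not cand.startswith(p): return '*'
-- 	return cand
--
-- def solve(pats):
-- 	prefices, suffices = set(), set()
-- 	mid = ''
-- 	for pat in pats:
-- 		toks = pat.split('*')
-- 		if toks[0]: prefices.add(toks[0])
-- 		if toks[-1]: suffices.add(toks[-1][::-1])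
-- 		mid += ''.join(toks[1:-1])
--
-- 	p = select(list(prefices))
-- 	s = select(list(suffices))[::-1]
-- 	return '*' if p == '*' or s == '*' else p + mid + s
-- ===== SOURCE B (Python) =====
-- def _absorb(state, t):
--     best, bad = state
--     if t.startswith(best):
--         return (t, bad)
--     if best.startswith(t):
--         return (best, bad)
--     return (best, True)
--
--
-- def solve(pats):
--     pstate = ('', False)
--     sstate = ('', False)
--     mids = []
--     for pat in pats:
--         toks = pat.split('*')
--         if toks[0]:
--             pstate = _absorb(pstate, toks[0])
--         if toks[-1]:
--             sstate = _absorb(sstate, toks[-1][::-1])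
--         mids.extend(toks[1:-1])
--     if pstate[1] or sstate[1]:
--         return '*'
--     return pstate[0] + ''.join(mids) + sstate[0][::-1]
-- ===== Notes on version B (the rewrite author's own statement) =====
-- stated objective: alternative
-- what changed: A collects prefix/suffix tokens into two sets and runs a sort-then-verify select pass over each; B makes a single left-to-right pass that absorbs each token into the current longest candidate (extend it, ignore a prefix of it, or flag incompatibility), with no sets and no sorting.
import Mathlib
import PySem

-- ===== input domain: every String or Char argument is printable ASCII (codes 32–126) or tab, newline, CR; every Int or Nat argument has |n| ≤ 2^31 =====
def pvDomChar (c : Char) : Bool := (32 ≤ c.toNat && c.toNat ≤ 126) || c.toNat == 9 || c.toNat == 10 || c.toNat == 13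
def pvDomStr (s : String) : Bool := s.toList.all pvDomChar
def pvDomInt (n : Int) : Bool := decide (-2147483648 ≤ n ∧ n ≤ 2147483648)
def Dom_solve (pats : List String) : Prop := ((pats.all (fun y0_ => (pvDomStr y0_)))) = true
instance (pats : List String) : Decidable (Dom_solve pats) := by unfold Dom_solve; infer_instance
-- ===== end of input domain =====

-- B replaces A's two sets plus sort-and-verify `select` passes by a single left-to-right
-- fold that absorbs each prefix/suffix token into the current longest candidate (objective:
-- alternative — no sorting, no set bookkeeping). A sorts its argument list in place; that
-- list is local to A, so no caller-visible mutation is involved.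

-- ===== PORT A =====
def select (prefices : List String) : String :=
  if prefices.isEmpty then ""
  else
    let ps := PySem.List.sorted prefices (fun x => PySem.Str.len x)
    let cand := (PySem.List.pyGet? ps (-1)).getD ""
    if ps.any (fun p => !(PySem.Str.startswith cand p)) then "*" else cand

def stepA (st : PySem.Set String × PySem.Set String × String) (pat : String) :
    PySem.Set String × PySem.Set String × String :=
  let toks := (PySem.Str.split? pat "*").getD []
  let t0 := (PySem.List.pyGet? toks 0).getD ""
  let tl := (PySem.List.pyGet? toks (-1)).getD ""
  ( if t0 ≠ "" then PySem.Set.add st.1 t0 else st.1,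
    if tl ≠ "" then PySem.Set.add st.2.1 ((PySem.Str.slice? tl none none (-1)).getD "") else st.2.1,
    PySem.Str.join "" [st.2.2, PySem.Str.join "" (PySem.List.slice toks (some 1) (some (-1)))] )

def solve (pats : List String) : String :=
  let st := pats.foldl stepA (PySem.Set.empty, PySem.Set.empty, "")
  let p := select st.1
  let s := (PySem.Str.slice? (select st.2.1) none none (-1)).getD ""
  if p = "*" || s = "*" then "*" else PySem.Str.join "" [p, st.2.2, s]

-- ===== PORT B =====
def absorb (st : String × Bool) (t : String) : String × Bool :=
  if PySem.Str.startswith t st.1 then (t, st.2)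
  else if PySem.Str.startswith st.1 t then st
  else (st.1, true)

def stepB (st : (String × Bool) × (String × Bool) × List String) (pat : String) :
    (String × Bool) × (String × Bool) × List String :=
  let toks := (PySem.Str.split? pat "*").getD []
  let t0 := (PySem.List.pyGet? toks 0).getD ""
  let tl := (PySem.List.pyGet? toks (-1)).getD ""
  ( if t0 ≠ "" then absorb st.1 t0 else st.1,
    if tl ≠ "" then absorb st.2.1 ((PySem.Str.slice? tl none none (-1)).getD "") else st.2.1,
    st.2.2 ++ PySem.List.slice toks (some 1) (some (-1)) )

def solve_alt (pats : List String) : String :=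
  let st := pats.foldl stepB (("", false), ("", false), [])
  if st.1.2 || st.2.1.2 then "*"
  else PySem.Str.join "" [st.1.1, PySem.Str.join "" st.2.2,
         (PySem.Str.slice? st.2.1.1 none none (-1)).getD ""]

-- ===== PRECONDITION & SPEC =====
def Spec_solve (pats : List String) (out : String) : Prop := out = solve_alt pats
instance (pats : List String) (out : String) : Decidable (Spec_solve pats out) := by unfold Spec_solve; infer_instance

-- ===== CLAIM (what is proved, stated in full; the proofs are below) =====
def Claim_equal_solve : Prop := ∀ (pats : List String), Dom_solve pats → Spec_solve pats (solve pats)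

-- ===== LEMMAS AND PROOFS =====

-- proof-only abbreviations for the token streams both ports read off `pats`
def pvToks (pat : String) : List String := (PySem.Str.split? pat "*").getD []
def pvT0 (pat : String) : String := (PySem.List.pyGet? (pvToks pat) 0).getD ""
def pvTl (pat : String) : String := (PySem.List.pyGet? (pvToks pat) (-1)).getD ""
def pvRev (s : String) : String := (PySem.Str.slice? s none none (-1)).getD ""
def pvPTok (pats : List String) : List String :=
  pats.flatMap (fun pat => if pvT0 pat ≠ "" then [pvT0 pat] else [])
def pvSTok (pats : List String) : List String :=
  pats.flatMap (fun pat => if pvTl pat ≠ "" then [pvRev (pvTl pat)] else [])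
def pvMids (pats : List String) : List String :=
  pats.flatMap (fun pat => PySem.List.slice (pvToks pat) (some 1) (some (-1)))
def pvChain (L : List String) : Prop := ∀ a ∈ L, ∀ b ∈ L, a.toList <+: b.toList ∨ b.toList <+: a.toList
def pvFoldP (L : List String) : String × Bool := L.foldl absorb ("", false)

theorem string_toList_inj {a b : String} (h : a.toList = b.toList) : a = b := by
  have := @String.ofList_toList a; rw [h, String.ofList_toList] at this; exact this.symm

theorem intercalate_nil_flatten (xs : List (List Char)) : List.intercalate [] xs = xs.flatten := by
  induction xs with
  | nil => rfl
  | cons a t ih =>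
    cases t with
    | nil => simp [List.intercalate]
    | cons b t' =>
      simp only [List.intercalate, List.intersperse] at ih ⊢
      simp_all

theorem join_empty_toList (parts : List String) :
    (PySem.Str.join "" parts).toList = (parts.map String.toList).flatten := by
  rw [PySem.Str.toList_join, PySem.Chars.join, show ("" : String).toList = [] from rfl,
    intercalate_nil_flatten]

theorem pvRev_toList (s : String) : (pvRev s).toList = s.toList.reverse := by
  rw [pvRev, PySem.Str.slice?_none_none_neg_one, Option.getD_some, String.toList_ofList]

theorem pvRev_pvRev (s : String) : pvRev (pvRev s) = s := by
  apply string_toList_inj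
  rw [pvRev_toList, pvRev_toList, List.reverse_reverse]

theorem pvRev_star : pvRev "*" = "*" := by
  apply string_toList_inj
  rw [pvRev_toList]
  rfl

theorem pvRev_empty : pvRev "" = "" := by
  apply string_toList_inj
  rw [pvRev_toList]
  rfl

theorem go_ne_nil (sep : List Char) : ∀ (fuel : Nat) (l cur : List Char) (acc : List (List Char)),
    PySem.Chars.splitOn.go sep fuel l cur acc ≠ [] := by
  intro fuel
  induction fuel with
  | zero =>
    intro l cur acc
    rw [PySem.Chars.splitOn.go.eq_def]
    simp
  | succ n ih =>
    intro l cur acc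
    rw [PySem.Chars.splitOn.go.eq_def]
    cases l with
    | nil => simp
    | cons c rest =>
      dsimp only
      split
      · exact ih _ _ _
      · exact ih _ _ _

theorem go_star_free : ∀ (fuel : Nat) (l cur : List Char) (acc : List (List Char)),
    l.length < fuel → (∀ p ∈ acc, ('*' : Char) ∉ p) → ('*' : Char) ∉ cur →
    ∀ p ∈ PySem.Chars.splitOn.go ['*'] fuel l cur acc, ('*' : Char) ∉ p := by
  intro fuel
  induction fuel with
  | zero => intro l cur acc h; omega
  | succ n ih =>
    intro l cur acc hlen hacc hcur
    rw [PySem.Chars.splitOn.go.eq_def]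
    cases l with
    | nil =>
      intro p hp
      simp only [List.mem_reverse, List.mem_cons] at hp
      rcases hp with hp | hp
      · subst hp; simpa using hcur
      · exact hacc p hp
    | cons c rest =>
      dsimp only
      split
      · rename_i hpre
        apply ih
        · simp at hlen ⊢; omega
        · intro p hp
          simp only [List.mem_cons] at hp
          rcases hp with hp | hp
          · subst hp; simpa using hcur
          · exact hacc p hp
        · simp
      · rename_i hpre
        have hc : c ≠ '*' := by
          intro h; subst h
          exact hpre (by simp [List.isPrefixOf])
        apply ih rest (c :: cur) acc (by simp at hlen ⊢; omega) hacc
        intro h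
        rcases List.mem_cons.mp h with h | h
        · exact hc h.symm
        · exact hcur h

theorem pvToks_eq (pat : String) :
    pvToks pat = (PySem.Chars.splitOn pat.toList ['*']).map String.ofList := by
  rw [pvToks, PySem.Str.split?, PySem.Chars.split?]
  rfl

-- splitOn by "*" yields a nonempty list of star-free pieces
theorem pvToks_ne_nil (pat : String) : pvToks pat ≠ [] := by
  rw [pvToks_eq]
  simp only [ne_eq, List.map_eq_nil_iff]
  rw [PySem.Chars.splitOn]
  exact go_ne_nil _ _ _ _ _

theorem pvToks_star_free (pat : String) : ∀ t ∈ pvToks pat, ('*' : Char) ∉ t.toList := by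
  intro t ht
  rw [pvToks_eq] at ht
  obtain ⟨piece, hmem, rfl⟩ := List.mem_map.mp ht
  rw [String.toList_ofList]
  rw [PySem.Chars.splitOn] at hmem
  exact go_star_free _ _ _ _ (by omega) (by simp) (by simp) piece hmem

theorem pvT0_mem (pat : String) : pvT0 pat ∈ pvToks pat := by
  have h := pvToks_ne_nil pat
  have hl : 0 < (pvToks pat).length := List.length_pos_iff.mpr h
  rw [pvT0, PySem.List.pyGet?_eq_some_getElem (pvToks pat) le_rfl (by exact_mod_cast hl)]
  simp

theorem pvTl_mem (pat : String) : pvTl pat ∈ pvToks pat := by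
  have h := pvToks_ne_nil pat
  rw [pvTl, PySem.List.pyGet?_neg_one, List.getLast?_eq_some_getLast h, Option.getD_some]
  exact List.getLast_mem h

-- the fold of B decomposed along the three token streams
theorem pvFoldP_append_ite (L : List String) (t : String) (c : Prop) [Decidable c] :
    pvFoldP (L ++ if c then [t] else []) = if c then absorb (pvFoldP L) t else pvFoldP L := by
  split <;> simp [pvFoldP, List.foldl_append]

theorem foldB_eq (pats : List String) :
    pats.foldl stepB (("", false), ("", false), []) =
      (pvFoldP (pvPTok pats), pvFoldP (pvSTok pats), pvMids pats) := by
  induction pats using List.reverseRecOn with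
  | nil => rfl
  | append_singleton l x ih =>
    rw [List.foldl_append, ih, List.foldl_cons, List.foldl_nil, stepB]
    have h1 : pvPTok (l ++ [x]) = pvPTok l ++ (if pvT0 x ≠ "" then [pvT0 x] else []) := by
      simp [pvPTok]
    have h2 : pvSTok (l ++ [x]) = pvSTok l ++ (if pvTl x ≠ "" then [pvRev (pvTl x)] else []) := by
      simp [pvSTok]
    have h3 : pvMids (l ++ [x]) = pvMids l ++ PySem.List.slice (pvToks x) (some 1) (some (-1)) := by
      simp [pvMids]
    rw [h1, h2, h3, pvFoldP_append_ite, pvFoldP_append_ite]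
    rfl

theorem join_join (xs ys : List String) :
    PySem.Str.join "" [PySem.Str.join "" xs, PySem.Str.join "" ys] = PySem.Str.join "" (xs ++ ys) := by
  apply string_toList_inj
  simp [PySem.Chars.join, intercalate_nil_flatten]

-- the fold of A decomposed along the same streams
theorem ofList_append_ite {c : Prop} [Decidable c] (L : List String) (t : String) :
    PySem.Set.ofList (L ++ if c then [t] else []) =
      if c then PySem.Set.add (PySem.Set.ofList L) t else PySem.Set.ofList L := by
  split <;> simp [PySem.Set.ofList_append_singleton]

theorem foldA_eq (pats : List String) :
    pats.foldl stepA (PySem.Set.empty, PySem.Set.empty, "") =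
      (PySem.Set.ofList (pvPTok pats), PySem.Set.ofList (pvSTok pats),
       PySem.Str.join "" (pvMids pats)) := by
  induction pats using List.reverseRecOn with
  | nil =>
    refine Prod.ext rfl (Prod.ext rfl ?_)
    apply string_toList_inj
    rw [join_empty_toList]
    rfl
  | append_singleton l x ih =>
    rw [List.foldl_append, ih, List.foldl_cons, List.foldl_nil, stepA]
    have h1 : pvPTok (l ++ [x]) = pvPTok l ++ (if pvT0 x ≠ "" then [pvT0 x] else []) := by
      simp [pvPTok]
    have h2 : pvSTok (l ++ [x]) = pvSTok l ++ (if pvTl x ≠ "" then [pvRev (pvTl x)] else []) := by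
      simp [pvSTok]
    have h3 : pvMids (l ++ [x]) = pvMids l ++ PySem.List.slice (pvToks x) (some 1) (some (-1)) := by
      simp [pvMids]
    rw [h1, h2, h3, ofList_append_ite, ofList_append_ite, ← join_join]
    rfl

-- behaviour of B's absorb fold: the flag is the chain test, the string the common bound
theorem pvFoldP_spec (L : List String) :
    ((pvFoldP L).2 = false ↔ pvChain L) ∧
    ((pvFoldP L).2 = false →
      (∀ t ∈ L, t.toList <+: (pvFoldP L).1.toList) ∧
      ((pvFoldP L).1 ∈ L ∨ ((pvFoldP L).1 = "" ∧ L = []))) := by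
  induction L using List.reverseRecOn with
  | nil =>
    refine ⟨⟨fun _ => by intro a ha; simp at ha, fun _ => rfl⟩, fun _ => ⟨by simp, Or.inr ⟨rfl, rfl⟩⟩⟩
  | append_singleton l t ih =>
    obtain ⟨ih1, ih2⟩ := ih
    have hstep : pvFoldP (l ++ [t]) = absorb (pvFoldP l) t := by
      simp [pvFoldP, List.foldl_append]
    have hsw : ∀ a b : String, PySem.Str.startswith a b = true ↔ b.toList <+: a.toList := by
      intro a b; rw [PySem.Str.startswith_eq]; exact PySem.Chars.startswith_iff _ _
    by_cases hb : (pvFoldP l).2 = false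
    · have hch : pvChain l := ih1.mp hb
      obtain ⟨hall, hmem⟩ := ih2 hb
      by_cases h1 : (pvFoldP l).1.toList <+: t.toList
      · have hres : pvFoldP (l ++ [t]) = (t, (pvFoldP l).2) := by
          rw [hstep, absorb, if_pos ((hsw t (pvFoldP l).1).mpr h1)]
        have haux : ∀ x ∈ l ++ [t], x.toList <+: t.toList := by
          intro x hx
          rcases List.mem_append.mp hx with hx | hx
          · exact (hall x hx).trans h1
          · simp at hx; subst hx; exact List.prefix_refl _
        constructor
        · rw [hres]
          simp only [hb]
          constructor
          · intro _ a ha b hbm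
            exact List.prefix_or_prefix_of_prefix (haux a ha) (haux b hbm)
          · intro _; trivial
        · intro _
          rw [hres]
          exact ⟨haux, Or.inl (by simp)⟩
      · have hpb : (pvFoldP l).1 ∈ l := by
          rcases hmem with h | ⟨he, _⟩
          · exact h
          · exact absurd (he ▸ List.nil_prefix) h1
        by_cases h2 : t.toList <+: (pvFoldP l).1.toList
        · have hres : pvFoldP (l ++ [t]) = pvFoldP l := by
            rw [hstep, absorb, if_neg (by rw [hsw]; exact h1),
              if_pos ((hsw (pvFoldP l).1 t).mpr h2)]
          have haux : ∀ x ∈ l ++ [t], x.toList <+: (pvFoldP l).1.toList := by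
            intro x hx
            rcases List.mem_append.mp hx with hx | hx
            · exact hall x hx
            · simp at hx; subst hx; exact h2
          constructor
          · rw [hres]
            simp only [hb]
            constructor
            · intro _ a ha b hbm
              exact List.prefix_or_prefix_of_prefix (haux a ha) (haux b hbm)
            · intro _; trivial
          · intro _
            rw [hres]
            exact ⟨haux, Or.inl (List.mem_append.mpr (Or.inl hpb))⟩
        · have hres : pvFoldP (l ++ [t]) = ((pvFoldP l).1, true) := by
            rw [hstep, absorb, if_neg (by rw [hsw]; exact h1), if_neg (by rw [hsw]; exact h2)]
          constructor
          · rw [hres]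
            simp only []
            constructor
            · intro h; simp at h
            · intro hch'
              exfalso
              rcases hch' (pvFoldP l).1 (List.mem_append.mpr (Or.inl hpb)) t (by simp) with h | h
              · exact h1 h
              · exact h2 h
          · intro h; rw [hres] at h; simp at h
    · have hbt : (pvFoldP l).2 = true := by
        cases h : (pvFoldP l).2
        · exact absurd h hb
        · rfl
      have hres : (pvFoldP (l ++ [t])).2 = true := by
        rw [hstep, absorb]
        split
        · simpa using hbt
        · split
          · exact hbt
          · rfl
      constructor
      · rw [hres]
        constructor
        · intro h; simp at h
        · intro hch'
          exfalso
          have : pvChain l := by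
            intro a ha b hbm
            exact hch' a (List.mem_append.mpr (Or.inl ha)) b (List.mem_append.mpr (Or.inl hbm))
          exact hb (ih1.mpr this)
      · intro h; rw [hres] at h; simp at h

-- A's select over the deduplicated stream equals B's fold outcome
theorem select_eq_fold (L : List String) :
    select (PySem.Set.ofList L) = (if (pvFoldP L).2 then "*" else (pvFoldP L).1) := by
  obtain ⟨hiff, himp⟩ := pvFoldP_spec L
  have hsw : ∀ a b : String, PySem.Str.startswith a b = true ↔ b.toList <+: a.toList := by
    intro a b; rw [PySem.Str.startswith_eq]; exact PySem.Chars.startswith_iff _ _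
  by_cases hL : L = []
  · subst hL; rfl
  · have hS : PySem.Set.ofList L ≠ [] := by
      obtain ⟨x, hx⟩ := List.exists_mem_of_ne_nil L hL
      intro h
      have := (PySem.Set.mem_ofList L x).mpr hx
      rw [h] at this; simp at this
    rw [select, if_neg (by simpa [List.isEmpty_iff] using hS)]
    have hpsne : PySem.List.sorted (PySem.Set.ofList L) (fun x => PySem.Str.len x) ≠ [] := by
      rw [ne_eq, PySem.List.sorted_eq_nil_iff]; exact hS
    set ps := PySem.List.sorted (PySem.Set.ofList L) (fun x => PySem.Str.len x) with hps
    have hcand : (PySem.List.pyGet? ps (-1)).getD "" = ps.getLast hpsne := by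
      rw [PySem.List.pyGet?_neg_one, List.getLast?_eq_some_getLast hpsne, Option.getD_some]
    change (if (ps.any fun p => !(PySem.Str.startswith ((PySem.List.pyGet? ps (-1)).getD "") p)) = true
        then "*" else (PySem.List.pyGet? ps (-1)).getD "") = _
    have hmemL : ∀ x, x ∈ ps ↔ x ∈ L := by
      intro x
      rw [hps, PySem.List.mem_sorted, PySem.Set.mem_ofList]
    have hcmem : ps.getLast hpsne ∈ L := (hmemL _).mp (List.getLast_mem hpsne)
    have hmax : ∀ x ∈ ps, x.toList.length ≤ (ps.getLast hpsne).toList.length := by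
      intro x hx
      obtain ⟨i, hi, hxe⟩ := List.getElem_of_mem hx
      have hq : ps.length - 1 < (PySem.List.sorted (PySem.Set.ofList L)
          (fun x => PySem.Str.len x)).length := by
        rw [← hps]
        have : 0 < ps.length := List.length_pos_iff.mpr hpsne
        omega
      have hmono := PySem.List.key_sorted_getElem_mono (PySem.Set.ofList L)
        (fun x => PySem.Str.len x) (p := i) (q := ps.length - 1) (by omega) hq
      simp only [← hps] at hmono
      rw [List.getLast_eq_getElem hpsne]
      rw [hxe] at hmono
      simp only [PySem.Str.len] at hmono
      exact_mod_cast hmono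
    cases hbad : (pvFoldP L).2 with
    | false =>
      obtain ⟨hall, hmem⟩ := himp hbad
      have hpbmem : (pvFoldP L).1 ∈ L := by
        rcases hmem with h | ⟨_, h⟩
        · exact h
        · exact absurd h hL
      have hpfx : (ps.getLast hpsne).toList <+: (pvFoldP L).1.toList := hall _ hcmem
      have hlen : (pvFoldP L).1.toList.length ≤ (ps.getLast hpsne).toList.length :=
        hmax _ ((hmemL _).mpr hpbmem)
      have heq : ps.getLast hpsne = (pvFoldP L).1 :=
        string_toList_inj (hpfx.eq_of_length_le hlen)
      have hany : (ps.any fun p =>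
          !(PySem.Str.startswith ((PySem.List.pyGet? ps (-1)).getD "") p)) = false := by
        rw [List.any_eq_false]
        intro p hp
        rw [hcand, heq]
        have hppfx : p.toList <+: (pvFoldP L).1.toList := hall p ((hmemL _).mp hp)
        simp only [Bool.not_eq_eq_eq_not, Bool.not_true, Bool.not_eq_false]
        exact (hsw _ _).mpr hppfx
      rw [hany]
      simp only [if_false, Bool.false_eq_true]
      rw [hcand, heq]
    | true =>
      have hnc : ¬ pvChain L := by
        intro h
        rw [hiff.mpr h] at hbad
        cases hbad
      simp only [pvChain, not_forall] at hnc
      obtain ⟨a, ha, b, hbm, hab⟩ := hnc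
      have hone : ¬ (a.toList <+: (ps.getLast hpsne).toList) ∨
          ¬ (b.toList <+: (ps.getLast hpsne).toList) := by
        by_contra h
        push Not at h
        exact hab (List.prefix_or_prefix_of_prefix h.1 h.2)
      have hany : (ps.any fun p =>
          !(PySem.Str.startswith ((PySem.List.pyGet? ps (-1)).getD "") p)) = true := by
        rw [List.any_eq_true]
        rcases hone with h | h
        · refine ⟨a, (hmemL _).mpr ha, ?_⟩
          rw [hcand]
          simp only [Bool.not_eq_eq_eq_not, Bool.not_true]
          exact Bool.eq_false_iff.mpr (fun hc => h ((hsw _ _).mp hc))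
        · refine ⟨b, (hmemL _).mpr hbm, ?_⟩
          rw [hcand]
          simp only [Bool.not_eq_eq_eq_not, Bool.not_true]
          exact Bool.eq_false_iff.mpr (fun hc => h ((hsw _ _).mp hc))
      rw [hany]
      simp

-- ===== VERDICT (by name: the statement is the Claim_ definition above) =====
-- a token drawn from the prefix stream is a split piece, hence never the string "*"
theorem pvPTok_ne_star (pats : List String) : ∀ x ∈ pvPTok pats, x ≠ "*" := by
  intro x hx
  simp only [pvPTok, List.mem_flatMap] at hx
  obtain ⟨pat, _, hx⟩ := hx
  have hx' : x = pvT0 pat := by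
    by_cases h : pvT0 pat ≠ "" <;> simp [h] at hx
    exact hx
  subst hx'
  intro he
  have := pvToks_star_free pat _ (pvT0_mem pat)
  rw [he] at this
  exact this (by decide)

theorem pvSTok_rev_ne_star (pats : List String) : ∀ x ∈ pvSTok pats, pvRev x ≠ "*" := by
  intro x hx
  simp only [pvSTok, List.mem_flatMap] at hx
  obtain ⟨pat, _, hx⟩ := hx
  have hx' : x = pvRev (pvTl pat) := by
    by_cases h : pvTl pat ≠ "" <;> simp [h] at hx
    exact hx
  subst hx'
  rw [pvRev_pvRev]
  intro he
  have := pvToks_star_free pat _ (pvTl_mem pat)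
  rw [he] at this
  exact this (by decide)

theorem solve_spec : Claim_equal_solve := by
  intro pats _
  unfold Spec_solve solve solve_alt
  rw [foldA_eq, foldB_eq]
  change (if (select (PySem.Set.ofList (pvPTok pats)) = "*" ||
        (PySem.Str.slice? (select (PySem.Set.ofList (pvSTok pats))) none none (-1)).getD "" = "*")
      then "*"
      else PySem.Str.join "" [select (PySem.Set.ofList (pvPTok pats)),
        PySem.Str.join "" (pvMids pats),
        (PySem.Str.slice? (select (PySem.Set.ofList (pvSTok pats))) none none (-1)).getD ""]) =
    (if ((pvFoldP (pvPTok pats)).2 || (pvFoldP (pvSTok pats)).2) then "*"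
      else PySem.Str.join "" [(pvFoldP (pvPTok pats)).1, PySem.Str.join "" (pvMids pats),
        (PySem.Str.slice? (pvFoldP (pvSTok pats)).1 none none (-1)).getD ""])
  rw [select_eq_fold, select_eq_fold]
  have hrev : ∀ t : String, (PySem.Str.slice? t none none (-1)).getD "" = pvRev t := fun t => rfl
  rw [hrev, hrev]
  obtain ⟨hiffP, himpP⟩ := pvFoldP_spec (pvPTok pats)
  obtain ⟨hiffS, himpS⟩ := pvFoldP_spec (pvSTok pats)
  cases hP : (pvFoldP (pvPTok pats)).2 with
  | true => simp
  | false =>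
    cases hS : (pvFoldP (pvSTok pats)).2 with
    | true => simp [pvRev_star]
    | false =>
      have hpne : (pvFoldP (pvPTok pats)).1 ≠ "*" := by
        rcases (himpP hP).2 with h | ⟨h, _⟩
        · exact pvPTok_ne_star pats _ h
        · rw [h]; decide
      have hsne : pvRev (pvFoldP (pvSTok pats)).1 ≠ "*" := by
        rcases (himpS hS).2 with h | ⟨h, _⟩
        · exact pvSTok_rev_ne_star pats _ h
        · rw [h, pvRev_empty]; decide
      simp [hpne, hsne]
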